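-- pv_equiv track=rewrite | github.com/MaherShahin/script_generator | backend/gpt/planner.py | get_displayed_plans
-- ===== SOURCE A (Python) =====
-- def get_displayed_plans(plans):
--     displayed_plans = []
--
--     plan_number = 1
--     plan_title = ""
--     plan_content = []
--
--     for line in plans:
--         if "Plan " in line:
--             if plan_title:  # Check if plan_title is not empty
--                 displayed_plans.append(f"{plan_title}\n{''.join(plan_content)}")
--                 plan_title = ""
--                 plan_content = []
--             plan_title = f"Plan {plan_number}: {line.split(':')[1].strip()}"
--             plan_number += 1
--         elif line != "":
--             plan_content.append(line + "\n")
--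
--     # Add the last plan
--     if plan_title:
--         displayed_plans.append(f"{plan_title}\n{''.join(plan_content)}")
--
--     return displayed_plans
-- ===== SOURCE B (Python) =====
-- def get_displayed_plans(plans):
--     i = next((k for k, l in enumerate(plans) if "Plan " in l), None)
--     if i is None:
--         return []
--     pre = [l + "\n" for l in plans[:i] if l != ""]
--     return _build(plans[i], plans[i + 1:], 1, pre)
--
--
-- def _build(plan_line, rest, n, pre):
--     title = f"Plan {n}: {plan_line.split(':')[1].strip()}"
--     j = next((k for k, l in enumerate(rest) if "Plan " in l), None)
--     if j is None:
--         return [title + "\n" + "".join(pre + [l + "\n" for l in rest if l != ""])]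
--     head = title + "\n" + "".join(pre + [l + "\n" for l in rest[:j] if l != ""])
--     return [head] + _build(rest[j], rest[j + 1:], n + 1, [])
-- ===== Notes on version B (the rewrite author's own statement) =====
-- stated objective: alternative
-- what changed: A's single pass with mutable accumulators (title/content/flush-on-next-plan) is replaced by a recursive decomposition: find the next plan line's index, emit that plan's title plus the segment of non-empty lines before the next plan line, and recurse on the remainder (the pre-first-plan lines are passed in as the first plan's leading content).
-- outside the precondition, e.g. on get_displayed_plans(['Plan one two']): A raises IndexError, B raises IndexError
import Mathlib
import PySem

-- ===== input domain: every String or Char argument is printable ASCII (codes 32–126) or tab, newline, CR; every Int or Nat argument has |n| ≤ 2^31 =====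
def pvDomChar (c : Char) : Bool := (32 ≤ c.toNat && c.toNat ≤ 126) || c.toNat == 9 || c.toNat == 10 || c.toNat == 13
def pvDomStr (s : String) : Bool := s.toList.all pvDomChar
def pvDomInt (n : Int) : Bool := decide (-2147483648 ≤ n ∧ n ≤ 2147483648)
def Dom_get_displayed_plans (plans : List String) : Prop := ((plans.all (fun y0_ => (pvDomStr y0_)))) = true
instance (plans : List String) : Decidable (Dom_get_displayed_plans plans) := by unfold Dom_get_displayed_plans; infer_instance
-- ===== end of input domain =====

-- B replaces A's one-pass accumulator loop by a recursive decomposition: find the plan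
-- lines, recurse segment by segment (objective: simpler decomposition, no speed claim).

-- ===== PORT A =====
-- shared transliteration of the f-string  f"Plan {n}: {line.split(':')[1].strip()}"
-- (identical source text in both Pythons); split(':')[1] raises IndexError when the
-- line has no colon — those inputs are excluded by Pre_ below, the .getD "" is never used there.
def pvTitle (n : Int) (line : String) : String :=
  "Plan " ++ PySem.Int.toStr n ++ ": " ++
    PySem.Str.strip ((PySem.List.pyGet? ((PySem.Str.split? line ":").getD []) 1).getD "")

structure PlanSt where
  displayed : List String
  num : Int
  title : String
  content : List String

-- one iteration of A's for-loop
def stepA (st : PlanSt) (line : String) : PlanSt :=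
  if PySem.Str.isIn "Plan " line then
    let st' := if st.title ≠ "" then
        { st with displayed := st.displayed ++ [st.title ++ "\n" ++ PySem.Str.join "" st.content],
                  title := "", content := [] }
      else st
    { st' with title := pvTitle st'.num line, num := st'.num + 1 }
  else if line ≠ "" then { st with content := st.content ++ [line ++ "\n"] }
  else st

-- A's trailing "add the last plan"
def pvFinal (st : PlanSt) : List String :=
  if st.title ≠ "" then
    st.displayed ++ [st.title ++ "\n" ++ PySem.Str.join "" st.content]
  else st.displayed

def get_displayed_plans (plans : List String) : List String :=
  pvFinal (plans.foldl stepA ⟨[], 1, "", []⟩)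

-- ===== PORT B =====
def pvIsPlan (l : String) : Bool := PySem.Str.isIn "Plan " l

-- [l + "\n" for l in ls if l != ""]
def pvBody (ls : List String) : List String :=
  (ls.filter (fun l => l ≠ "")).map (fun l => l ++ "\n")

def pvBuild (plan_line : String) (rest : List String) (n : Int) (pre : List String) : List String :=
  let title := pvTitle n plan_line
  match h : rest.findIdx? pvIsPlan with
  | none => [title ++ "\n" ++ PySem.Str.join "" (pre ++ pvBody rest)]
  | some j =>
    have hj : j < rest.length := (List.findIdx?_eq_some_iff_getElem.mp h).fst
    (title ++ "\n" ++ PySem.Str.join "" (pre ++ pvBody (rest.take j))) ::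
      pvBuild rest[j] (rest.drop (j + 1)) (n + 1) []
termination_by rest.length
decreasing_by simp; omega

def get_displayed_plans_alt (plans : List String) : List String :=
  match h : plans.findIdx? pvIsPlan with
  | none => []
  | some i =>
    have hi : i < plans.length := (List.findIdx?_eq_some_iff_getElem.mp h).fst
    pvBuild plans[i] (plans.drop (i + 1)) 1 (pvBody (plans.take i))

-- ===== PRECONDITION & SPEC =====
-- Pre_ excludes inputs on which Python A raises IndexError: a line containing "Plan "
-- but no ':' makes line.split(':')[1] fail (B raises there identically).
def Pre_get_displayed_plans (plans : List String) : Prop :=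
  ∀ l ∈ plans, PySem.Str.isIn "Plan " l = true → PySem.Str.isIn ":" l = true
instance (plans : List String) : Decidable (Pre_get_displayed_plans plans) := by
  unfold Pre_get_displayed_plans; infer_instance

def pvWitness_get_displayed_plans : List String :=
  ["intro", "Plan 1: Alpha", "a", "", "Plan 2: Beta", "b"]

def Spec_get_displayed_plans (plans : List String) (out : List String) : Prop := out = get_displayed_plans_alt plans
instance (plans : List String) (out : List String) : Decidable (Spec_get_displayed_plans plans out) := by unfold Spec_get_displayed_plans; infer_instance

-- ===== CLAIM (what is proved, stated in full; the proofs are below) =====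
def Claim_equal_get_displayed_plans : Prop := ∀ (plans : List String), Dom_get_displayed_plans plans → Pre_get_displayed_plans plans → Spec_get_displayed_plans plans (get_displayed_plans plans)

-- ===== LEMMAS AND PROOFS =====

theorem pvTitle_ne (n : Int) (l : String) : pvTitle n l ≠ "" := by
  intro h
  have := congrArg String.toList h
  simp [pvTitle] at this

theorem pvBuild_none (pl : String) (rest : List String) (n : Int) (pre : List String)
    (h : rest.findIdx? pvIsPlan = none) :
    pvBuild pl rest n pre = [pvTitle n pl ++ "\n" ++ PySem.Str.join "" (pre ++ pvBody rest)] := by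
  rw [pvBuild.eq_def]
  split <;> simp_all

theorem pvBuild_some (pl : String) (rest : List String) (n : Int) (pre : List String) (j : Nat)
    (h : rest.findIdx? pvIsPlan = some j) (hj : j < rest.length) :
    pvBuild pl rest n pre =
      (pvTitle n pl ++ "\n" ++ PySem.Str.join "" (pre ++ pvBody (rest.take j))) ::
        pvBuild rest[j] (rest.drop (j + 1)) (n + 1) [] := by
  rw [pvBuild.eq_def]
  split
  · simp_all
  · rename_i j' heq
    have hjj : j' = j := by rw [heq] at h; exact (Option.some.injEq _ _).mp h
    subst hjj
    rfl

-- a plan-free segment only accumulates content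
theorem foldl_noplan (mid : List String) (h : ∀ l ∈ mid, pvIsPlan l = false)
    (d : List String) (n : Int) (t : String) (c : List String) :
    mid.foldl stepA ⟨d, n, t, c⟩ = ⟨d, n, t, c ++ pvBody mid⟩ := by
  induction mid generalizing c with
  | nil => simp [pvBody]
  | cons l ls ih =>
    have hl := h l (by simp)
    rw [List.foldl_cons]
    by_cases he : l = "" <;>
      simp_all [stepA, pvIsPlan, pvBody, List.append_assoc]

theorem take_noplan {rest : List String} {j : Nat} (h : rest.findIdx? pvIsPlan = some j) :
    ∀ l ∈ rest.take j, pvIsPlan l = false := by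
  obtain ⟨hj, -, hmin⟩ := List.findIdx?_eq_some_iff_getElem.mp h
  intro l hl
  obtain ⟨k, hk, rfl⟩ := List.mem_take_iff_getElem.mp hl
  have := hmin k (by omega)
  simpa using this

theorem step_plan (d : List String) (n : Int) (t : String) (c : List String) (l : String)
    (hp : pvIsPlan l = true) (ht : t ≠ "") :
    stepA ⟨d, n, t, c⟩ l =
      ⟨d ++ [t ++ "\n" ++ PySem.Str.join "" c], n + 1, pvTitle n l, []⟩ := by
  simp [stepA, pvIsPlan] at hp ⊢
  simp [hp, ht]

theorem step_plan_empty (d : List String) (n : Int) (c : List String) (l : String)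
    (hp : pvIsPlan l = true) :
    stepA ⟨d, n, "", c⟩ l = ⟨d, n + 1, pvTitle n l, c⟩ := by
  simp [stepA, pvIsPlan] at hp ⊢
  simp [hp]

theorem build_eq : ∀ (N : Nat) (rest : List String), rest.length ≤ N →
    ∀ (n : Int) (pl : String) (c acc : List String),
    pvFinal (rest.foldl stepA ⟨acc, n + 1, pvTitle n pl, c⟩) = acc ++ pvBuild pl rest n c := by
  intro N
  induction N with
  | zero =>
    intro rest hlen n pl c acc
    have : rest = [] := List.length_eq_zero_iff.mp (by omega)
    subst this
    rw [pvBuild_none _ _ _ _ (by simp)]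
    simp [pvFinal, pvTitle_ne, pvBody]
  | succ N ih =>
    intro rest hlen n pl c acc
    cases hF : rest.findIdx? pvIsPlan with
    | none =>
      have hnp := List.findIdx?_eq_none_iff.mp hF
      rw [foldl_noplan rest hnp, pvBuild_none _ _ _ _ hF]
      simp [pvFinal, pvTitle_ne]
    | some j =>
      obtain ⟨hj, hpj, -⟩ := List.findIdx?_eq_some_iff_getElem.mp hF
      have hsplit : rest = rest.take j ++ rest[j] :: rest.drop (j + 1) := by
        conv_lhs => rw [← List.take_append_drop j rest]
        rw [List.getElem_cons_drop hj]
      conv_lhs => rw [hsplit]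
      rw [List.foldl_append, foldl_noplan _ (take_noplan hF), List.foldl_cons,
        step_plan _ _ _ _ _ hpj (pvTitle_ne n pl),
        ih _ (by
          have h2 : (rest.drop (j + 1)).length = rest.length - (j + 1) := List.length_drop
          omega),
        pvBuild_some _ _ _ _ _ hF hj]
      simp

theorem alt_none (plans : List String) (h : plans.findIdx? pvIsPlan = none) :
    get_displayed_plans_alt plans = [] := by
  unfold get_displayed_plans_alt
  split <;> simp_all

theorem alt_some (plans : List String) (i : Nat) (h : plans.findIdx? pvIsPlan = some i)
    (hi : i < plans.length) :
    get_displayed_plans_alt plans =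
      pvBuild plans[i] (plans.drop (i + 1)) 1 (pvBody (plans.take i)) := by
  unfold get_displayed_plans_alt
  split
  · simp_all
  · rename_i i' heq
    have : i' = i := by rw [heq] at h; exact (Option.some.injEq _ _).mp h
    subst this
    rfl

-- ===== VERDICT (by name: the statement is the Claim_ definition above) =====
theorem get_displayed_plans_spec : Claim_equal_get_displayed_plans := by
  intro plans _ _
  unfold Spec_get_displayed_plans get_displayed_plans
  cases hF : plans.findIdx? pvIsPlan with
  | none =>
    have hnp := List.findIdx?_eq_none_iff.mp hF
    rw [foldl_noplan plans hnp, alt_none _ hF]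
    simp [pvFinal]
  | some i =>
    obtain ⟨hi, hpi, -⟩ := List.findIdx?_eq_some_iff_getElem.mp hF
    have hsplit : plans = plans.take i ++ plans[i] :: plans.drop (i + 1) := by
      conv_lhs => rw [← List.take_append_drop i plans]
      rw [List.getElem_cons_drop hi]
    rw [alt_some _ _ hF hi]
    conv_lhs => rw [hsplit]
    rw [List.foldl_append, foldl_noplan _ (take_noplan hF), List.foldl_cons,
      step_plan_empty _ _ _ _ hpi]
    have := build_eq (plans.drop (i + 1)).length (plans.drop (i + 1)) le_rfl 1 plans[i]
      ([] ++ pvBody (plans.take i)) []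
    simpa using this
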